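-- pv_equiv track=rewrite | github.com/ji-eun-moon/Algorithm | LeetCode/1-6_BinarySearch.py | search
-- ===== SOURCE A (Python) =====
-- def search(nums, target):
--
--     # O(n)
--     num_list = []
--     for idx, num in enumerate(nums):
--         num_list.append([num, idx])
--
--     # O(nlogn)
--     num_list.sort(key = lambda x: x[0])
--
--     left, right = 0, len(nums)-1
--
--     while left <= right:
--         mid = (left + right) // 2
--         if num_list[mid][0] > target:
--             right -= 1
--         elif num_list[mid][0] < target:
--             left += 1
--         else:
--             return num_list[mid][1]
--
--     return -1
-- ===== SOURCE B (Python) =====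
-- def search(nums, target):
--     for i, v in enumerate(nums):
--         if v == target:
--             return i
--     return -1
-- ===== Notes on version B (the rewrite author's own statement) =====
-- stated objective: faster
-- what changed: B replaces A's build-pairs/sort/bound-shrinking loop by a single linear scan returning the index of the first match; Pre_ excludes lists where target occurs more than once, on which the particular duplicate index A returns is an accident of its sort-then-shrink loop and either choice is defensible.
-- outside the precondition, e.g. on search([1, 1, 1], 1): A returns 1, B returns 0
import Mathlib
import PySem

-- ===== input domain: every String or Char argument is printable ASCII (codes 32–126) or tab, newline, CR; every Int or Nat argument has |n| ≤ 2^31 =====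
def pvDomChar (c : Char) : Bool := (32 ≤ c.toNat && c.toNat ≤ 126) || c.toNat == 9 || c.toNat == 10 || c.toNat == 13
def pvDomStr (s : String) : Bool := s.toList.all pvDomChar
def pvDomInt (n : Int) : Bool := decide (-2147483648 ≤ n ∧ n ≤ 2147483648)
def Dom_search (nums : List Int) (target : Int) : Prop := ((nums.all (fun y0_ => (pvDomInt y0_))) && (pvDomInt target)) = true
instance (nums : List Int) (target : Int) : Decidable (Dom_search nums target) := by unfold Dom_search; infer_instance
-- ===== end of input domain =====

-- B replaces A's build-pairs/sort/bound-shrinking loop (O(n log n)) by a single linear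
-- scan for the first match (O(n)); Pre_ excludes lists where target occurs more than once.

-- ===== PORT A =====
-- A's while loop; the `none` arm of pyGet? is Python's IndexError, unreachable here
-- (0 ≤ left ≤ mid ≤ right < len whenever the lookup happens).
def searchLoop (numList : List (Int × Int)) (target left right : Int) : Int :=
  if _h : left ≤ right then
    match PySem.List.pyGet? numList (PySem.Int.floordiv (left + right) 2) with
    | none => 0
    | some p =>
      if p.1 > target then searchLoop numList target left (right - 1)
      else if p.1 < target then searchLoop numList target (left + 1) right
      else p.2
  else -1
termination_by (right - left + 1).toNat
decreasing_by all_goals omega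

def search (nums : List Int) (target : Int) : Int :=
  -- num_list = []; for idx, num in enumerate(nums): num_list.append([num, idx])
  let numList := (PySem.List.enumerate nums).foldl (fun acc p => acc ++ [(p.2, p.1)]) []
  -- num_list.sort(key = lambda x: x[0])
  let sortedList := PySem.List.sorted numList (fun x => x.1) false
  searchLoop sortedList target 0 ((nums.length : Int) - 1)

-- ===== PORT B =====
-- for i, v in enumerate(nums): if v == target: return i   (early return → structural recursion)
def altScan (l : List (Int × Int)) (target : Int) : Int :=
  match l with
  | [] => -1
  | p :: rest => if p.2 = target then p.1 else altScan rest target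

def search_alt (nums : List Int) (target : Int) : Int :=
  altScan (PySem.List.enumerate nums) target

-- ===== PRECONDITION & SPEC =====
-- Pre_ excludes lists in which target occurs more than once: which duplicate's original
-- index A returns there is an accident of its sort-then-shrink loop, and either choice
-- (A's mid-block pick, B's first occurrence) is equally defensible.
def Pre_search (nums : List Int) (target : Int) : Prop :=
  nums.countP (fun v => decide (v = target)) ≤ 1
instance (nums : List Int) (target : Int) : Decidable (Pre_search nums target) := by
  unfold Pre_search; infer_instance

def pvWitness_search : List Int × Int := ([1, 2, 3], 2)

def Spec_search (nums : List Int) (target : Int) (out : Int) : Prop := out = search_alt nums target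
instance (nums : List Int) (target : Int) (out : Int) : Decidable (Spec_search nums target out) := by unfold Spec_search; infer_instance

-- ===== CLAIM (what is proved, stated in full; the proofs are below) =====
def Claim_equal_search : Prop := ∀ (nums : List Int) (target : Int), Dom_search nums target → Pre_search nums target → Spec_search nums target (search nums target)

-- ===== LEMMAS AND PROOFS =====

-- B's scan returns the original index of the first matching element, else -1
lemma altScan_filter (t : Int) (l : List (Int × Int)) :
    altScan l t =
      match l.filter (fun p => decide (p.2 = t)) with
      | [] => -1
      | q :: _ => q.1 := by
  induction l with
  | nil => simp [altScan]
  | cons p rest ih =>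
    by_cases h : p.2 = t
    · simp [altScan, h]
    · simp [altScan, h, ih]

-- one insertion step of A's stable sort keeps the class of elements with key = t in order,
-- appending the new element at its end when it belongs to the class
lemma filter_insertBy_eq (t : Int) (x : Int × Int) (ys : List (Int × Int))
    (hs : ys.Pairwise (fun a b => a.1 ≤ b.1)) :
    (PySem.List.insertBy (fun a b => decide (a.1 < b.1)) x ys).filter (fun y => decide (y.1 = t)) =
      if x.1 = t then ys.filter (fun y => decide (y.1 = t)) ++ [x]
      else ys.filter (fun y => decide (y.1 = t)) := by
  induction ys with
  | nil =>
    by_cases hxt : x.1 = t <;> simp [PySem.List.insertBy, hxt]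
  | cons y ys ih =>
    obtain ⟨hy, htl⟩ := List.pairwise_cons.mp hs
    by_cases hxy : x.1 < y.1
    · simp only [PySem.List.insertBy, hxy, decide_true, if_true]
      by_cases hxt : x.1 = t
      · have hnil : List.filter (fun y => decide (y.1 = t)) (y :: ys) = [] := by
          rw [List.filter_eq_nil_iff]
          intro z hz
          have hyz : y.1 ≤ z.1 := by
            rcases List.mem_cons.mp hz with h | h
            · simp [h]
            · exact hy z h
          simp only [decide_eq_true_eq]
          omega
        rw [List.filter_cons_of_pos (by simp [hxt]), hnil, if_pos hxt]
        simp
      · rw [List.filter_cons_of_neg (by simp [hxt]), if_neg hxt]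
    · simp only [PySem.List.insertBy, hxy, decide_false, Bool.false_eq_true, if_false,
        List.filter_cons, ih htl]
      by_cases hxt : x.1 = t <;> by_cases hyt : y.1 = t <;> simp [hxt, hyt]

-- appending one element to the input inserts it into the sorted output
lemma sorted_append_singleton (xs : List (Int × Int)) (x : Int × Int) :
    PySem.List.sorted (xs ++ [x]) (fun p => p.1) false =
      PySem.List.insertBy (fun a b => decide (a.1 < b.1)) x
        (PySem.List.sorted xs (fun p => p.1) false) := by
  rw [PySem.List.sorted_eq_foldl_insertBy, PySem.List.sorted_eq_foldl_insertBy,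
    List.foldl_append]
  rfl

-- STABILITY of A's sort on one key class: filtering by key = t commutes with sorting
lemma sorted_filter_class (t : Int) (xs : List (Int × Int)) :
    (PySem.List.sorted xs (fun p => p.1) false).filter (fun y => decide (y.1 = t)) =
      xs.filter (fun y => decide (y.1 = t)) := by
  induction xs using List.reverseRecOn with
  | nil => simp [PySem.List.sorted_eq_foldl_insertBy]
  | append_singleton xs x ih =>
    rw [sorted_append_singleton,
      filter_insertBy_eq t x _ (PySem.List.sorted_pairwise xs (fun p => p.1)),
      List.filter_append, List.filter_cons]
    by_cases hxt : x.1 = t <;> simp [hxt, ih]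

-- in a key-sorted list, a downward-closed predicate holds exactly on a prefix of length countP
lemma sorted_pos_iff (q : Int × Int → Bool)
    (hdc : ∀ a b : Int × Int, a.1 ≤ b.1 → q b = true → q a = true) :
    ∀ (s : List (Int × Int)), s.Pairwise (fun a b => a.1 ≤ b.1) →
      ∀ m (hm : m < s.length), (q s[m] = true ↔ m < s.countP q) := by
  intro s
  induction s with
  | nil => intro _ m hm; simp at hm
  | cons a tl ih =>
    intro hs m hm
    obtain ⟨ha, htl⟩ := List.pairwise_cons.mp hs
    cases m with
    | zero =>
      simp only [List.getElem_cons_zero, List.countP_cons]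
      constructor
      · intro h
        simp [h]
      · intro h
        by_contra hqa
        have hqa' : q a = false := by
          cases hq : q a
          · rfl
          · exact absurd hq hqa
        rw [hqa'] at h
        simp only [Bool.false_eq_true, if_false, Nat.add_zero] at h
        obtain ⟨b, hb, hqb⟩ := List.countP_pos_iff.mp h
        exact hqa (hdc a b (ha b hb) hqb)
    | succ m =>
      have hm' : m < tl.length := by simpa using hm
      have hiff := ih htl m hm'
      simp only [List.getElem_cons_succ, List.countP_cons]
      constructor
      · intro h
        have h1 : m < tl.countP q := hiff.mp h
        have hqa : q a = true := hdc a tl[m] (ha tl[m] (List.getElem_mem hm')) h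
        have h2 : (if q a = true then 1 else 0) = 1 := by rw [hqa]; simp
        omega
      · intro h
        apply hiff.mpr
        have hle : (if q a = true then 1 else 0) ≤ 1 := by split <;> omega
        omega

-- on pairs, elements with key ≤ t are those with key < t plus those with key = t
lemma countP_le_split (t : Int) (xs : List (Int × Int)) :
    xs.countP (fun p => decide (p.1 ≤ t)) =
      xs.countP (fun p => decide (p.1 < t)) + xs.countP (fun p => decide (p.1 = t)) := by
  induction xs with
  | nil => simp
  | cons x xs ih =>
    simp only [List.countP_cons, ih]
    by_cases h1 : x.1 < t <;> by_cases h2 : x.1 = t <;> by_cases h3 : x.1 ≤ t <;>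
      simp [h1, h2, h3] <;> omega

-- if no element of s has key t, A's loop falls through to -1
lemma loop_none (s : List (Int × Int)) (t : Int)
    (h : ∀ x ∈ s, x.1 ≠ t) :
    ∀ (n : Nat) (l r : Int), (r - l + 1).toNat ≤ n → 0 ≤ l → r < (s.length : Int) →
      searchLoop s t l r = -1 := by
  intro n
  induction n with
  | zero =>
    intro l r hn hl hr
    rw [searchLoop, dif_neg (by omega)]
  | succ n ih =>
    intro l r hn hl hr
    by_cases hlr : l ≤ r
    · have hmid := PySem.Int.floordiv_two_mid_bounds hlr
      set mid := PySem.Int.floordiv (l + r) 2 with hmiddef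
      have hmn : mid.toNat < s.length := by omega
      have hcast : (mid.toNat : Int) = mid := by omega
      have hget : PySem.List.pyGet? s mid = some (s[mid.toNat]) := by
        have hnc := PySem.List.pyGet?_natCast s mid.toNat
        rw [hcast] at hnc
        rw [hnc, List.getElem?_eq_getElem hmn]
      have hne : s[mid.toNat].1 ≠ t := h _ (List.getElem_mem hmn)
      rw [searchLoop, dif_pos hlr, ← hmiddef, hget]
      by_cases hgt : s[mid.toNat].1 > t
      · simp only [hgt, if_pos]
        exact ih l (r - 1) (by omega) hl (by omega)
      · have hlt : s[mid.toNat].1 < t := by omega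
        simp only [hgt, if_false, hlt, if_pos]
        exact ih (l + 1) r (by omega) (by omega) hr
    · rw [searchLoop, dif_neg hlr]

-- if s has a unique key-t element at position K (smaller keys strictly before, larger
-- strictly after), A's loop returns its stored index
lemma loop_hit (s : List (Int × Int)) (t : Int) (K : Nat) (hK : K < s.length)
    (heq : s[K].1 = t)
    (hlo : ∀ m (hm : m < s.length), m < K → s[m].1 < t)
    (hhi : ∀ m (hm : m < s.length), K < m → t < s[m].1) :
    ∀ (n : Nat) (l r : Int), (r - l + 1).toNat ≤ n → 0 ≤ l → r < (s.length : Int) →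
      l ≤ (K : Int) → (K : Int) ≤ r →
      searchLoop s t l r = s[K].2 := by
  intro n
  induction n with
  | zero =>
    intro l r hn hl hr hlK hKr
    omega
  | succ n ih =>
    intro l r hn hl hr hlK hKr
    have hlr : l ≤ r := by omega
    have hmid := PySem.Int.floordiv_two_mid_bounds hlr
    set mid := PySem.Int.floordiv (l + r) 2 with hmiddef
    have hmn : mid.toNat < s.length := by omega
    have hcast : (mid.toNat : Int) = mid := by omega
    have hget : PySem.List.pyGet? s mid = some (s[mid.toNat]) := by
      have hnc := PySem.List.pyGet?_natCast s mid.toNat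
      rw [hcast] at hnc
      rw [hnc, List.getElem?_eq_getElem hmn]
    rw [searchLoop, dif_pos hlr, ← hmiddef, hget]
    by_cases hcmp : mid.toNat = K
    · subst hcmp
      have h1 : ¬ s[mid.toNat].1 > t := by omega
      have h2 : ¬ s[mid.toNat].1 < t := by omega
      simp only [h1, if_false, h2]
    · by_cases hgtK : K < mid.toNat
      · have hgt : s[mid.toNat].1 > t := hhi mid.toNat hmn hgtK
        simp only [hgt, if_pos]
        exact ih l (r - 1) (by omega) hl (by omega) hlK (by omega)
      · have hltK : mid.toNat < K := by omega
        have hlt : s[mid.toNat].1 < t := hlo mid.toNat hmn hltK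
        have h1 : ¬ s[mid.toNat].1 > t := by omega
        simp only [h1, if_false, hlt, if_pos]
        exact ih (l + 1) r (by omega) (by omega) hr (by omega) hKr

-- ===== VERDICT (by name: the statement is the Claim_ definition above) =====
theorem search_spec : Claim_equal_search := by
  intro nums target _ hpre
  unfold Spec_search search search_alt
  set enum := PySem.List.enumerate nums 0 with henum
  -- A's first loop builds the (value, index) pair list
  have hA : enum.foldl (fun acc p => acc ++ [(p.2, p.1)]) [] =
      enum.map (fun p => (p.2, p.1)) := by
    simpa using PySem.List.foldl_append_singleton_eq_map (fun p : Int × Int => (p.2, p.1)) enum []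
  rw [hA]
  set pairs := enum.map (fun p => (p.2, p.1)) with hpairs
  set s := PySem.List.sorted pairs (fun x => x.1) false with hsdef
  have hperm := PySem.List.sorted_perm pairs (fun x => x.1) false
  have hpw : s.Pairwise (fun a b => a.1 ≤ b.1) :=
    PySem.List.sorted_pairwise pairs (fun p => p.1)
  have hlens : s.length = nums.length := by
    rw [hsdef, hperm.length_eq, hpairs]
    simp [henum, PySem.List.length_enumerate]
  -- the value-t classes of s, pairs and enum coincide (stability)
  have hfilter : pairs.filter (fun p => decide (p.1 = target)) =
      (enum.filter (fun p => decide (p.2 = target))).map (fun p => (p.2, p.1)) := by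
    rw [hpairs, List.filter_map]
    rfl
  have hsfil : s.filter (fun p => decide (p.1 = target)) =
      (enum.filter (fun p => decide (p.2 = target))).map (fun p => (p.2, p.1)) := by
    rw [hsdef, sorted_filter_class, hfilter]
  -- the count of target occurrences bounds the filtered enum list
  have hcnt : (enum.filter (fun p => decide (p.2 = target))).length =
      nums.countP (fun v => decide (v = target)) := by
    rw [← List.countP_eq_length_filter]
    have := PySem.List.map_snd_enumerate nums 0
    calc enum.countP (fun p => decide (p.2 = target))
        = (enum.map (fun p : Int × Int => p.2)).countP (fun v => decide (v = target)) := by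
          rw [List.countP_map]; rfl
      _ = nums.countP (fun v => decide (v = target)) := by rw [this]
  rw [altScan_filter]
  rcases hCeq : enum.filter (fun p => decide (p.2 = target)) with _ | ⟨q, rest⟩
  · -- no occurrence: both sides are -1
    have hnone : ∀ x ∈ s, x.1 ≠ target := by
      intro x hx hxt
      have : x ∈ s.filter (fun p => decide (p.1 = target)) :=
        List.mem_filter.mpr ⟨hx, by simp [hxt]⟩
      rw [hsfil, hCeq] at this
      simp at this
    rw [hCeq]
    exact loop_none s target hnone _ 0 ((nums.length : Int) - 1) (le_refl _) (le_refl 0)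
      (by rw [hlens]; omega)
  · -- exactly one occurrence (Pre_): A finds its position in the sorted list
    have hrest : rest = [] := by
      have hl := hcnt
      rw [hCeq] at hl
      unfold Pre_search at hpre
      simp only [List.length_cons] at hl
      have : rest.length = 0 := by omega
      exact List.length_eq_zero_iff.mp this
    subst hrest
    have hqmem : q ∈ enum.filter (fun p => decide (p.2 = target)) := by
      rw [hCeq]; exact List.mem_cons_self
    have hqt : q.2 = target := by simpa using (List.mem_filter.mp hqmem).2
    have hsfil1 : s.filter (fun p => decide (p.1 = target)) = [(target, q.1)] := by
      rw [hsfil, hCeq]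
      simp [hqt]
    set A := pairs.countP (fun p => decide (p.1 < target)) with hAdef
    have hE : pairs.countP (fun p => decide (p.1 = target)) = 1 := by
      rw [List.countP_eq_length_filter, hfilter, hCeq]
      rfl
    have hsltA : s.countP (fun p => decide (p.1 < target)) = A := by
      rw [hperm.countP_eq]
    have hsleA : s.countP (fun p => decide (p.1 ≤ target)) = A + 1 := by
      rw [hperm.countP_eq, countP_le_split, hE]
    have hlt_iff : ∀ m (hm : m < s.length), (s[m].1 < target ↔ m < A) := by
      intro m hm
      have h := sorted_pos_iff (fun p => decide (p.1 < target))
        (fun a b hab hqb => by simp only [decide_eq_true_eq] at *; omega) s hpw m hm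
      rw [hsltA] at h
      simpa using h
    have hle_iff : ∀ m (hm : m < s.length), (s[m].1 ≤ target ↔ m < A + 1) := by
      intro m hm
      have h := sorted_pos_iff (fun p => decide (p.1 ≤ target))
        (fun a b hab hqb => by simp only [decide_eq_true_eq] at *; omega) s hpw m hm
      rw [hsleA] at h
      simpa using h
    have hAlen : A + 1 ≤ s.length := by
      rw [← hsleA]
      exact List.countP_le_length
    have hKlen : A < s.length := by omega
    have hKt : s[A].1 = target := by
      have h1 := (hle_iff A hKlen).mpr (by omega)
      have h2 : ¬ s[A].1 < target := fun h => by have := (hlt_iff A hKlen).mp h; omega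
      omega
    have hKval : s[A] = (target, q.1) := by
      have : s[A] ∈ s.filter (fun p => decide (p.1 = target)) :=
        List.mem_filter.mpr ⟨List.getElem_mem hKlen, by simp [hKt]⟩
      rw [hsfil1] at this
      simpa using this
    have hlo : ∀ m (hm : m < s.length), m < A → s[m].1 < target := by
      intro m hm h
      exact (hlt_iff m hm).mpr h
    have hhi : ∀ m (hm : m < s.length), A < m → target < s[m].1 := by
      intro m hm h
      have hne : ¬ s[m].1 ≤ target := fun hc => by have := (hle_iff m hm).mp hc; omega
      omega
    have hKn : A < nums.length := by omega
    have := loop_hit s target A hKlen hKt hlo hhi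
      (((nums.length : Int) - 1) - 0 + 1).toNat 0 ((nums.length : Int) - 1)
      (le_refl _) (le_refl 0) (by omega) (by omega) (by omega)
    rw [this, hKval, hCeq]
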